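-- pv_equiv track=rewrite | github.com/dariprim/algorithms-and-data-structures | lab7algos.py | optimal_schedule
-- ===== SOURCE A (Python) =====
-- def optimal_schedule(tasks):
--     processors = [[] for _ in range(4)]
--     processor_times = [0] * 4
--
--     for task in sorted(tasks):  # Сортируем задачи по времени
--         min_processor = processor_times.index(min(processor_times))
--         processors[min_processor].append(task)
--         processor_times[min_processor] += task
--
--     return processors
-- ===== SOURCE B (Python) =====
-- def optimal_schedule(tasks):
--     processors = [[] for _ in range(4)]
--     # priority queue of (load, processor-index) pairs, kept sorted ascending;
--     # the head is always the least-loaded processor (lowest index on ties).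
--     queue = [(0, i) for i in range(4)]
--     for task in sorted(tasks):
--         load, idx = queue.pop(0)
--         processors[idx].append(task)
--         new = (load + task, idx)
--         j = 0
--         while j < len(queue) and queue[j] <= new:
--             j += 1
--         queue.insert(j, new)
--     return processors
-- ===== Notes on version B (the rewrite author's own statement) =====
-- stated objective: alternative
-- what changed: Replaces A's per-task linear scan index(min(processor_times)) over the load list by a priority queue of (load, index) pairs kept sorted ascending: pop the head (least-loaded, lowest index on ties), append the task there, and reinsert the updated pair at its sorted position.
import Mathlib
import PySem

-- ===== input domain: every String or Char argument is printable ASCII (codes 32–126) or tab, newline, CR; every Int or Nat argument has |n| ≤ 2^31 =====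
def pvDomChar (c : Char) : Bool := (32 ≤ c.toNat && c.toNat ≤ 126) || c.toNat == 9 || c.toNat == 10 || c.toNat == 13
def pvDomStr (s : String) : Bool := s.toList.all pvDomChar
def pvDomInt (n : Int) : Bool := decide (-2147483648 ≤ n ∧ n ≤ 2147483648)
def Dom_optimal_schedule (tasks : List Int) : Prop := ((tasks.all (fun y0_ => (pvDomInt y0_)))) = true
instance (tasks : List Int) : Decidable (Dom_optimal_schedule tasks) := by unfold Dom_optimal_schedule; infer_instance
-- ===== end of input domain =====

-- B replaces A's per-task linear scan `index(min(times))` by a (load, index)-sorted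
-- priority queue whose head is always the least-loaded processor (alternative decomposition).

-- ===== PORT A =====
-- step of A's loop body: pick the first least-loaded processor by index(min(times)).
-- times is always the 4-element load list, hence nonempty, so min?/index? never return none;
-- the .getD 0 only discharges the Option.
def aStep (st : List (List Int) × List Int) (task : Int) : List (List Int) × List Int :=
  let m := ((PySem.List.index? st.2 ((PySem.List.min? st.2 (fun x => x)).getD 0)).getD 0)
  (st.1.modify m (fun l => l ++ [task]), st.2.modify m (fun t => t + task))

def optimal_schedule (tasks : List Int) : List (List Int) :=
  ((PySem.List.sorted tasks (fun x => x) false).foldl aStep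
    ([[], [], [], []], [0, 0, 0, 0])).1

-- ===== PORT B =====
-- Source B's while-loop insertion: insert x before the first queue element strictly greater
-- (lexicographically, as Python compares the (load, idx) tuples).
def insortQ (x : Int × Nat) : List (Int × Nat) → List (Int × Nat)
  | [] => [x]
  | h :: t => if h.1 < x.1 ∨ (h.1 = x.1 ∧ h.2 ≤ x.2) then h :: insortQ x t else x :: h :: t

-- step of B's loop body: pop the queue head, schedule the task there, reinsert the new load.
-- the queue always has 4 elements; the [] branch is unreachable.
def bStep (st : List (List Int) × List (Int × Nat)) (task : Int) :
    List (List Int) × List (Int × Nat) :=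
  match st with
  | (procs, []) => (procs, [])
  | (procs, (load, idx) :: rest) =>
      (procs.modify idx (fun l => l ++ [task]), insortQ (load + task, idx) rest)

def optimal_schedule_alt (tasks : List Int) : List (List Int) :=
  ((PySem.List.sorted tasks (fun x => x) false).foldl bStep
    ([[], [], [], []], [(0, 0), (0, 1), (0, 2), (0, 3)])).1

-- ===== PRECONDITION & SPEC =====
def Spec_optimal_schedule (tasks : List Int) (out : List (List Int)) : Prop := out = optimal_schedule_alt tasks
instance (tasks : List Int) (out : List (List Int)) : Decidable (Spec_optimal_schedule tasks out) := by unfold Spec_optimal_schedule; infer_instance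

-- ===== CLAIM (what is proved, stated in full; the proofs are below) =====
def Claim_equal_optimal_schedule : Prop := ∀ (tasks : List Int), Dom_optimal_schedule tasks → Spec_optimal_schedule tasks (optimal_schedule tasks)

-- ===== LEMMAS AND PROOFS =====

-- strict lexicographic order on (load, index) pairs
def lexLt (a b : Int × Nat) : Prop := a.1 < b.1 ∨ (a.1 = b.1 ∧ a.2 < b.2)

def SchedInv (times : List Int) (queue : List (Int × Nat)) : Prop :=
  queue.Perm times.zipIdx ∧ queue.Pairwise lexLt

theorem insortQ_perm (x : Int × Nat) (l : List (Int × Nat)) :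
    (insortQ x l).Perm (x :: l) := by
  induction l with
  | nil => simp [insortQ]
  | cons h t ih =>
    simp only [insortQ]
    split
    · exact ((ih.cons h).trans (List.Perm.swap x h t))
    · exact List.Perm.refl _

theorem mem_insortQ {y x : Int × Nat} {l : List (Int × Nat)} (h : y ∈ insortQ x l) :
    y = x ∨ y ∈ l := by
  have := (insortQ_perm x l).mem_iff.mp h
  simpa using this

theorem insortQ_pairwise {x : Int × Nat} {l : List (Int × Nat)}
    (hl : l.Pairwise lexLt) (hne : ∀ y ∈ l, y.2 ≠ x.2) :
    (insortQ x l).Pairwise lexLt := by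
  induction l with
  | nil => simp [insortQ]
  | cons h t ih =>
    rcases List.pairwise_cons.mp hl with ⟨hht, ht⟩
    simp only [insortQ]
    split
    · rename_i hc
      refine List.pairwise_cons.mpr ⟨?_, ih ht (fun y hy => hne y (by simp [hy]))⟩
      intro y hy
      have hne' : h.2 ≠ x.2 := hne h (by simp)
      rcases mem_insortQ hy with rfl | hy'
      · unfold lexLt at *; omega
      · exact hht y hy'
    · rename_i hc
      refine List.pairwise_cons.mpr ⟨?_, hl⟩
      have hlex : lexLt x h := by unfold lexLt; omega
      intro y hy
      rcases List.mem_cons.mp hy with rfl | hy'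
      · exact hlex
      · have h2 := hht y hy'
        unfold lexLt at *
        omega

theorem zipIdx_map_snd (xs : List Int) :
    xs.zipIdx.map Prod.snd = List.range xs.length := by
  apply List.ext_getElem
  · simp
  · intro k h1 h2
    simp

theorem zipIdx_modify (xs : List Int) (i : Nat) (f : Int → Int) :
    (xs.modify i f).zipIdx
      = xs.zipIdx.map (fun p => if p.2 = i then (f p.1, p.2) else p) := by
  apply List.ext_getElem
  · simp
  · intro k h1 h2
    simp only [List.getElem_zipIdx, List.getElem_map, List.getElem_modify]
    split <;> simp_all
    intro a
    omega

theorem mem_zipIdx_getElem {xs : List Int} {p : Int × Nat} (hp : p ∈ xs.zipIdx) :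
    ∃ h : p.2 < xs.length, xs[p.2] = p.1 := by
  obtain ⟨x, i⟩ := p
  obtain ⟨-, h2, h3⟩ := List.mem_zipIdx hp
  simp only [Nat.zero_add] at h2
  exact ⟨h2, by simpa using h3.symm⟩

theorem getElem_mem_zipIdx {xs : List Int} {i : Nat} (h : i < xs.length) :
    (xs[i], i) ∈ xs.zipIdx := by
  rw [List.mk_mem_zipIdx_iff_getElem?]
  simp [List.getElem?_eq_getElem h]

theorem head_min {times : List Int} {l : Int} {i : Nat} {rest : List (Int × Nat)}
    (hperm : ((l, i) :: rest).Perm times.zipIdx)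
    (hpw : ((l, i) :: rest).Pairwise lexLt) :
    PySem.List.min? times (fun x => x) = some l ∧ PySem.List.index? times l = some i := by
  obtain ⟨hht, -⟩ := List.pairwise_cons.mp hpw
  have hmemz : (l, i) ∈ times.zipIdx := hperm.subset (List.mem_cons_self)
  obtain ⟨hi, hgi⟩ := mem_zipIdx_getElem hmemz
  simp only at hi hgi
  -- every earlier position with value l would contradict the lex order, every value is ≥ l
  have hfirst : ∀ j (hj : j < times.length), times[j] = l → i ≤ j := by
    intro j hj hje
    by_contra hlt
    have hmem : (l, j) ∈ (l, i) :: rest := hperm.mem_iff.mpr (hje ▸ getElem_mem_zipIdx hj)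
    rcases List.mem_cons.mp hmem with he | hr
    · simp at he; omega
    · have h2 : l < l ∨ (l = l ∧ i < j) := hht _ hr
      omega
  have hlb : ∀ v ∈ times, l ≤ v := by
    intro v hv
    obtain ⟨j, hj, hje⟩ := List.mem_iff_getElem.mp hv
    have hmem : (v, j) ∈ (l, i) :: rest := hperm.mem_iff.mpr (hje ▸ getElem_mem_zipIdx hj)
    rcases List.mem_cons.mp hmem with he | hr
    · simp at he; omega
    · have h2 : l < v ∨ (l = v ∧ i < j) := hht _ hr
      omega
  have hne : times ≠ [] := by intro h; subst h; simp at hi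
  constructor
  · obtain ⟨m, hm⟩ : ∃ m, PySem.List.min? times (fun x => x) = some m := by
      cases h : PySem.List.min? times (fun x => x) with
      | none => exact absurd ((PySem.List.min?_eq_none_iff times (fun x => x)).mp h) hne
      | some m => exact ⟨m, rfl⟩
    have hmmem := PySem.List.min?_mem hm
    have hmin := PySem.List.min?_isMin hm
    have h1 : l ≤ m := hlb m hmmem
    have h2 : m ≤ l := hmin _ (hgi ▸ List.getElem_mem hi)
    rw [hm]; exact congrArg some (le_antisymm h2 h1)
  · rw [PySem.List.index?_eq_some_iff]
    refine ⟨times.take i, times.drop (i + 1), ?_, ?_, ?_⟩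
    · conv_lhs => rw [← List.take_append_drop i times]
      rw [List.drop_eq_getElem_cons hi, hgi]
    · simp [hi.le]
    · intro hmem
      obtain ⟨j, hj, hje⟩ := List.mem_iff_getElem.mp hmem
      rw [List.length_take] at hj
      have hj' : j < times.length := by omega
      rw [List.getElem_take] at hje
      have := hfirst j hj' hje
      omega

theorem rest_snd_ne {times : List Int} {l : Int} {i : Nat} {rest : List (Int × Nat)}
    (hperm : ((l, i) :: rest).Perm times.zipIdx) :
    ∀ q ∈ rest, q.2 ≠ i := by
  have hnd : (((l, i) :: rest).map Prod.snd).Nodup := by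
    refine ((hperm.map Prod.snd).nodup_iff).mpr ?_
    rw [zipIdx_map_snd]
    exact List.nodup_range
  simp only [List.map_cons, List.nodup_cons] at hnd
  intro q hq he
  exact hnd.1 (he ▸ List.mem_map_of_mem hq)

theorem inv_step {times : List Int} {l : Int} {i : Nat} {rest : List (Int × Nat)}
    (hperm : ((l, i) :: rest).Perm times.zipIdx)
    (hpw : ((l, i) :: rest).Pairwise lexLt) (task : Int) :
    SchedInv (times.modify i (fun t => t + task)) (insortQ (l + task, i) rest) := by
  have hsnd := rest_snd_ne hperm
  constructor
  · have hmap : (times.modify i (fun t => t + task)).zipIdx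
        = times.zipIdx.map (fun p => if p.2 = i then (p.1 + task, p.2) else p) :=
      zipIdx_modify times i (fun t => t + task)
    have hrest : rest.map (fun p => if p.2 = i then (p.1 + task, p.2) else p) = rest := by
      conv_rhs => rw [← List.map_id rest]
      apply List.map_congr_left
      intro q hq
      simp [hsnd q hq]
    have hqm : ((l, i) :: rest).map (fun p => if p.2 = i then (p.1 + task, p.2) else p)
        = (l + task, i) :: rest := by simp [hrest]
    have h1 : (insortQ (l + task, i) rest).Perm
        (((l, i) :: rest).map (fun p => if p.2 = i then (p.1 + task, p.2) else p)) := by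
      rw [hqm]; exact insortQ_perm _ _
    exact h1.trans (by rw [hmap]; exact hperm.map _)
  · exact insortQ_pairwise (List.pairwise_cons.mp hpw).2 (fun y hy => hsnd y hy)

theorem loop_eq (L : List Int) : ∀ (procs : List (List Int)) (times : List Int)
    (queue : List (Int × Nat)), SchedInv times queue → times ≠ [] →
    (L.foldl aStep (procs, times)).1 = (L.foldl bStep (procs, queue)).1 := by
  induction L with
  | nil => intro _ _ _ _ _; rfl
  | cons task L ih =>
    intro procs times queue hInv hne
    obtain ⟨hperm, hpw⟩ := hInv
    match queue with
    | [] =>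
      exfalso
      have := hperm.length_eq
      simp at this
      exact hne (List.eq_nil_of_length_eq_zero this.symm)
    | (l, i) :: rest =>
      obtain ⟨hmin, hidx⟩ := head_min hperm hpw
      have ha : aStep (procs, times) task
          = (procs.modify i (fun xs => xs ++ [task]), times.modify i (fun t => t + task)) := by
        have hidx' : List.idxOf? l times = some i := by
          rw [← PySem.List.index?_eq_idxOf?]; exact hidx
        simp [aStep, hmin, hidx']
      have hb : bStep (procs, (l, i) :: rest) task
          = (procs.modify i (fun xs => xs ++ [task]), insortQ (l + task, i) rest) := rfl
      rw [List.foldl_cons, List.foldl_cons, ha, hb]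
      exact ih _ _ _ (inv_step hperm hpw task)
        (by intro h
            have := congrArg List.length h
            simp at this
            exact hne this)

-- ===== VERDICT (by name: the statement is the Claim_ definition above) =====
theorem optimal_schedule_spec : Claim_equal_optimal_schedule := by
  intro tasks _
  unfold Spec_optimal_schedule optimal_schedule optimal_schedule_alt
  apply loop_eq
  · constructor
    · show List.Perm _ _
      norm_num [List.zipIdx]
    · norm_num [List.pairwise_cons, lexLt]
  · simp
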